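-- pv_equiv track=rewrite | github.com/sheetalsannakki084/CodingPatterns-Educative | leetcode parctice/dummy.py | solution
-- ===== SOURCE A (Python) =====
-- def solution(w):
--     sl=w.split()
--     count=0
--
--     for i ,word in enumerate(sl):
--         valid=True
--         hypencount=0
--         for j ,w in  enumerate(word):
--             if w.isdigit():
--                 valid=False
--                 break
--             if w =='-' and (j==len(word)-1 or j==0) or(w=='-' and (not word[j - 1].isalpha() or not word[j + 1].isalpha())):
--                 valid=False
--                 break
--             if w in  (",",".","!")and j!=len(word)-1 :
--                 valid=False
--                 break
--             if w=='-':
--                 hypencount+=1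
--                 if hypencount>1:
--                     valid=False
--                     break
--         if valid:
--             count+=1
--
--     return count
-- ===== SOURCE B (Python) =====
-- def solution(w):
--     def ok(word):
--         if any(c.isdigit() for c in word):
--             return False
--         if word.count('-') > 1:
--             return False
--         if '-' in word:
--             k = word.index('-')
--             if k == 0 or k == len(word) - 1:
--                 return False
--             if not (word[k - 1].isalpha() and word[k + 1].isalpha()):
--                 return False
--         if any(c in ',.!' for c in word[:-1]):
--             return False
--         return True
--     return sum(1 for word in w.split() if ok(word))
-- ===== Notes on version B (the rewrite author's own statement) =====
-- stated objective: alternative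
-- what changed: A validates each word with one fused character scan carrying a break flag and a running hyphen counter; B validates it by independent aggregate checks (any digit anywhere, total '-' count, position/neighbours of the unique '-' found via index, punctuation occurring in word[:-1]) and counts valid words with a sum over the split.
import Mathlib
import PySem

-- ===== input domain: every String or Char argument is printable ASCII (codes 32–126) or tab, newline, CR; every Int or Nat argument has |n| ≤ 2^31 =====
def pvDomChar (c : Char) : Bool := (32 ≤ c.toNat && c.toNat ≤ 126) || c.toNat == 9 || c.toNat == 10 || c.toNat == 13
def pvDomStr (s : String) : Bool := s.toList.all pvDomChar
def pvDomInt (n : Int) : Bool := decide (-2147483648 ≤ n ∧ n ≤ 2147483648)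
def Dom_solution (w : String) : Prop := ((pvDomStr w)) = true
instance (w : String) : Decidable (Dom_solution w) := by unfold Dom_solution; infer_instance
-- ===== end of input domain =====

-- B replaces A's fused char-scan-with-break per word by independent aggregate
-- checks (any digit, hyphen count/position via index, punctuation in word[:-1]);
-- objective: alternative decomposition, same cost.

-- ===== PORT A =====
-- inner 'for j, w in enumerate(word)' loop with its break flag and hyphen counter;
-- word[j-1] / word[j+1] are only evaluated by Python at interior j (in range), ported as getD.
def solInner (word : List Char) : List Char → Nat → Nat → Bool
  | [], _, _ => true
  | c :: rest, j, hyp =>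
    if PySem.Chars.isdigit c then false
    else if (c == '-' && (j == word.length - 1 || j == 0)) ||
            (c == '-' && (!PySem.Chars.isalpha (word.getD (j - 1) ' ') ||
                          !PySem.Chars.isalpha (word.getD (j + 1) ' '))) then false
    else if (c == ',' || c == '.' || c == '!') && !(j == word.length - 1) then false
    else if c == '-' then
      if hyp + 1 > 1 then false else solInner word rest (j + 1) (hyp + 1)
    else solInner word rest (j + 1) hyp

def solution (w : String) : Int :=
  (PySem.Str.split₀ w).foldl
    (fun count word => if solInner word.toList word.toList 0 0 then count + 1 else count) 0

-- ===== PORT B =====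
-- word[k-1] / word[k+1] are only reached with 1 ≤ k, k + 1 < len(word) (in range), ported as getD.
def okAlt (word : List Char) : Bool :=
  if word.any (fun c => PySem.Chars.isdigit c) then false
  else if PySem.List.count word '-' > 1 then false
  else if (match PySem.List.index? word '-' with
           | none => false      -- '-' not in word: skip the hyphen block
           | some k =>
             (k == 0 || k == word.length - 1) ||
             !(PySem.Chars.isalpha (word.getD (k - 1) ' ') &&
               PySem.Chars.isalpha (word.getD (k + 1) ' '))) then false
  else if (PySem.List.slice word none (some (-1))).any
            (fun c => c == ',' || c == '.' || c == '!') then false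
  else true

def solution_alt (w : String) : Int :=
  ((PySem.Str.split₀ w).countP (fun word => okAlt word.toList) : Int)

-- ===== PRECONDITION & SPEC =====
def Spec_solution (w : String) (out : Int) : Prop := out = solution_alt w
instance (w : String) (out : Int) : Decidable (Spec_solution w out) := by unfold Spec_solution; infer_instance

-- ===== CLAIM (what is proved, stated in full; the proofs are below) =====
def Claim_equal_solution : Prop := ∀ (w : String), Dom_solution w → Spec_solution w (solution w)

-- ===== LEMMAS AND PROOFS =====

-- 'position j of word is a reason A's inner scan declares the word invalid'
-- (proof-only characterisation shared by both ports)
def badAt (word : List Char) (j : Nat) : Bool :=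
  let c := word.getD j ' '
  PySem.Chars.isdigit c ||
  (c == '-' && (j + 1 == word.length || j == 0 ||
                !PySem.Chars.isalpha (word.getD (j - 1) ' ') ||
                !PySem.Chars.isalpha (word.getD (j + 1) ' '))) ||
  ((c == ',' || c == '.' || c == '!') && !(j + 1 == word.length)) ||
  (c == '-' && (word.take j).count '-' + 1 > 1)


theorem count_two_exists (l : List Char) (a : Char) (h : 2 ≤ l.count a) :
    ∃ j, ∃ hj : j < l.length, l[j] = a ∧ 1 ≤ (l.take j).count a := by
  induction l with
  | nil => simp at h
  | cons x xs ih =>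
    by_cases hx : x = a
    · have hxs : 1 ≤ xs.count a := by
        rw [List.count_cons, if_pos (by simp [hx])] at h; omega
      obtain ⟨i, hi, hia⟩ := List.mem_iff_getElem.mp (List.count_pos_iff.mp hxs)
      refine ⟨i+1, by simpa using hi, by simpa using hia, ?_⟩
      simp [hx]
    · have hxs : 2 ≤ xs.count a := by
        rw [List.count_cons, if_neg (by simp [hx])] at h; omega
      obtain ⟨j, hj, hja, hjc⟩ := ih hxs
      exact ⟨j+1, by simpa using hj, by simpa using hja,
        by simpa [List.count_cons, hx] using hjc⟩

theorem count_le_one_unique (l : List Char) (a : Char) (h : l.count a ≤ 1)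
    {i j : ℕ} (hi : i < l.length) (hj : j < l.length)
    (ha : l[i] = a) (hb : l[j] = a) : i = j := by
  induction l generalizing i j with
  | nil => simp at hi
  | cons x xs ih =>
    match i, j with
    | 0, 0 => rfl
    | 0, j+1 =>
      exfalso
      have hmem : a ∈ xs := by
        have hjx : j < xs.length := by simpa using hj
        have : xs[j]'hjx = a := by simpa using hb
        exact this ▸ List.getElem_mem _
      have : 1 ≤ xs.count a := List.count_pos_iff.mpr hmem
      rw [List.count_cons, if_pos (by simp_all)] at h; omega
    | i+1, 0 =>
      exfalso
      have hmem : a ∈ xs := by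
        have hix : i < xs.length := by simpa using hi
        have : xs[i]'hix = a := by simpa using ha
        exact this ▸ List.getElem_mem _
      have : 1 ≤ xs.count a := List.count_pos_iff.mpr hmem
      rw [List.count_cons, if_pos (by simp_all)] at h; omega
    | i+1, j+1 =>
      have : i = j := ih (by rw [List.count_cons] at h; omega)
        (by simpa using hi) (by simpa using hj) (by simpa using ha) (by simpa using hb)
      omega

theorem count_take_eq_zero (l : List Char) (a : Char) (j : ℕ) (hj : j < l.length)
    (ha : l[j] = a) (h : l.count a ≤ 1) : (l.take j).count a = 0 := by
  have hsplit : l.count a = (l.take j).count a + (l.drop j).count a := by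
    conv_lhs => rw [← List.take_append_drop j l]
    exact List.count_append ..
  have hmem : a ∈ l.drop j := by
    rw [← List.getElem_cons_drop hj, ha]
    exact List.mem_cons_self ..
  have : 1 ≤ (l.drop j).count a := List.count_pos_iff.mpr hmem
  omega


theorem solInner_eq_all (word : List Char) :
    ∀ cs j, word.drop j = cs →
      solInner word cs j ((word.take j).count '-') =
        (List.range' j (word.length - j)).all (fun i => !badAt word i) := by
  intro cs
  induction cs with
  | nil =>
    intro j h
    have hlen : word.length ≤ j := by
      have := congrArg List.length h
      simp at this; omega
    simp [solInner, Nat.sub_eq_zero_of_le hlen]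
  | cons c rest ih =>
    intro j h
    have hj : j < word.length := by
      by_contra hle
      rw [List.drop_eq_nil_of_le (by omega)] at h
      exact absurd h (by simp)
    have hget : word[j]? = some c := by
      have h0 : (word.drop j)[0]? = word[j+0]? := List.getElem?_drop
      rw [h] at h0; simpa using h0.symm
    have hc : word.getD j ' ' = c := by
      rw [List.getD_eq_getElem word ' ' hj]
      have := List.getElem?_eq_getElem (l := word) (i := j) hj
      rw [hget] at this; exact (Option.some_injective _ this).symm
    have hrest : word.drop (j+1) = rest := by
      have hdd := List.drop_drop (l := word) (i := 1) (j := j)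
      rw [h] at hdd
      simpa [Nat.add_comm] using hdd.symm
    have htake : (word.take (j+1)).count '-' =
        (word.take j).count '-' + (if c = '-' then 1 else 0) := by
      rw [List.take_add_one, hget, List.count_append]
      split <;> simp_all
    have hlast : ((j == word.length - 1) : Bool) = (j + 1 == word.length) := by
      rw [Bool.eq_iff_iff]; simp; omega
    have hbad : badAt word j =
      (PySem.Chars.isdigit c ||
       ((c == '-' && (j == word.length - 1 || j == 0)) ||
        (c == '-' && (!PySem.Chars.isalpha (word.getD (j - 1) ' ') ||
                      !PySem.Chars.isalpha (word.getD (j + 1) ' ')))) ||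
       ((c == ',' || c == '.' || c == '!') && !(j == word.length - 1)) ||
       (c == '-' && decide ((word.take j).count '-' + 1 > 1))) := by
      simp only [badAt, hc, hlast, Bool.and_or_distrib_left]
      ac_rfl
    have hn : word.length - j = (word.length - (j+1)) + 1 := by omega
    rw [hn, List.range'_succ, List.all_cons]
    simp only [solInner]
    by_cases h1 : PySem.Chars.isdigit c = true
    · rw [if_pos h1]
      have hbt : badAt word j = true := by rw [hbad, h1]; simp
      rw [hbt]; simp
    · rw [if_neg h1]
      have h1f : PySem.Chars.isdigit c = false := by simpa using h1
      by_cases h2 : ((c == '-' && (j == word.length - 1 || j == 0)) ||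
                     (c == '-' && (!PySem.Chars.isalpha (word.getD (j - 1) ' ') ||
                                   !PySem.Chars.isalpha (word.getD (j + 1) ' ')))) = true
      · rw [if_pos h2]
        have hbt : badAt word j = true := by rw [hbad, h2]; simp
        rw [hbt]; simp
      · rw [if_neg h2]
        have h2f : ((c == '-' && (j == word.length - 1 || j == 0)) ||
                    (c == '-' && (!PySem.Chars.isalpha (word.getD (j - 1) ' ') ||
                                  !PySem.Chars.isalpha (word.getD (j + 1) ' ')))) = false := by
          simpa using h2
        by_cases h3 : ((c == ',' || c == '.' || c == '!') && !(j == word.length - 1)) = true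
        · rw [if_pos h3]
          have hbt : badAt word j = true := by rw [hbad, h3]; simp
          rw [hbt]; simp
        · rw [if_neg h3]
          have h3f : ((c == ',' || c == '.' || c == '!') && !(j == word.length - 1)) = false := by
            simpa using h3
          by_cases h4 : (c == '-') = true
          · rw [if_pos h4]
            have hc4 : c = '-' := by simpa using h4
            by_cases h5 : (word.take j).count '-' + 1 > 1
            · rw [if_pos h5]
              have hbt : badAt word j = true := by
                rw [hbad, h1f, h2f, h3f, h4, decide_eq_true h5]; simp
              rw [hbt]; simp
            · rw [if_neg h5]
              have hrec := ih (j+1) hrest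
              rw [htake, if_pos hc4] at hrec
              rw [hrec]
              have hbf : badAt word j = false := by
                rw [hbad, h1f, h2f, h3f, decide_eq_false h5]; simp
              rw [hbf]; simp
          · rw [if_neg h4]
            have h4f : (c == '-') = false := by simpa using h4
            have hrec := ih (j+1) hrest
            rw [htake, if_neg (by simpa using h4)] at hrec
            simp only [Nat.add_zero] at hrec
            rw [hrec]
            have hbf : badAt word j = false := by
              rw [hbad, h1f, h2f, h3f, h4f]; simp
            rw [hbf]; simp

theorem badAt_eq_false_iff (word : List Char) (i : ℕ) (hi : i < word.length) :
    badAt word i = false ↔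
      PySem.Chars.isdigit (word[i]'hi) = false ∧
      (word[i]'hi = '-' → i ≠ 0 ∧ i + 1 ≠ word.length ∧
          PySem.Chars.isalpha (word.getD (i-1) ' ') = true ∧
          PySem.Chars.isalpha (word.getD (i+1) ' ') = true ∧
          (word.take i).count '-' = 0) ∧
      ((word[i]'hi = ',' ∨ word[i]'hi = '.' ∨ word[i]'hi = '!') → i + 1 = word.length) := by
  simp [badAt, List.getElem?_eq_getElem hi,
    List.count_eq_zero]
  tauto

theorem okAlt_eq_all (word : List Char) :
    okAlt word = (List.range word.length).all (fun i => !badAt word i) := by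
  rw [Bool.eq_iff_iff]
  have hall : (List.range word.length).all (fun i => !badAt word i) = true ↔
      ∀ i (_ : i < word.length), badAt word i = false := by
    simp [List.all_eq_true]
  rw [hall]
  unfold okAlt
  rw [PySem.List.slice_to_neg_one]
  constructor
  · intro hok
    split_ifs at hok with h1 h2 h3 h4
    intro i hi
    rw [badAt_eq_false_iff word i hi]
    refine ⟨?_, ?_, ?_⟩
    · by_contra hd
      exact h1 (List.any_eq_true.mpr ⟨word[i]'hi, List.getElem_mem _, by simp_all⟩)
    · intro hc
      -- '-' occurs, so index? is some k with the checks passing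
      have hmem : '-' ∈ word := hc ▸ List.getElem_mem _
      obtain ⟨k, hk'⟩ := Option.isSome_iff_exists.mp (List.isSome_idxOf?.mpr hmem)
      have hk : PySem.List.index? word '-' = some k := by
        rw [PySem.List.index?_eq_idxOf?]; exact hk'
      obtain ⟨hklen, hkeq, -⟩ := PySem.List.getElem_of_index?_eq_some hk
      rw [hk, Bool.not_eq_true] at h3
      have h3f : ((k == 0 || k == word.length - 1) ||
          !(PySem.Chars.isalpha (word.getD (k - 1) ' ') &&
            PySem.Chars.isalpha (word.getD (k + 1) ' '))) = false := h3
      simp only [Bool.or_eq_false_iff, Bool.not_eq_false', Bool.and_eq_true,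
        beq_eq_false_iff_ne] at h3f
      obtain ⟨⟨hk0, hkl⟩, ha1, ha2⟩ := h3f
      have hcle : word.count '-' ≤ 1 := by
        rw [PySem.List.count_eq] at h2; omega
      have hik : i = k := count_le_one_unique word '-' hcle hi hklen hc hkeq
      subst hik
      refine ⟨hk0, by omega, ha1, ha2, ?_⟩
      exact count_take_eq_zero word '-' i hi hc hcle
    · intro hc
      by_contra hlen
      have hidl : i < word.dropLast.length := by simp; omega
      refine h4 (List.any_eq_true.mpr ⟨word.dropLast[i]'hidl, List.getElem_mem _, ?_⟩)
      rw [List.getElem_dropLast]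
      rcases hc with hc | hc | hc <;> simp [hc]
  · intro hb
    split_ifs with h1 h2 h3 h4
    · obtain ⟨c, hcm, hcd⟩ := List.any_eq_true.mp h1
      obtain ⟨i, hi, hie⟩ := List.mem_iff_getElem.mp hcm
      have := (badAt_eq_false_iff word i hi).mp (hb i hi)
      simp_all
    · rw [PySem.List.count_eq] at h2
      obtain ⟨j, hj, hja, hjc⟩ := count_two_exists word '-' (by omega)
      have := ((badAt_eq_false_iff word j hj).mp (hb j hj)).2.1 hja
      omega
    · rcases hidx : PySem.List.index? word '-' with _ | k
      · rw [hidx] at h3; exact absurd h3 Bool.false_ne_true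
      · obtain ⟨hklen, hkeq, -⟩ := PySem.List.getElem_of_index?_eq_some hidx
        have hgood := ((badAt_eq_false_iff word k hklen).mp (hb k hklen)).2.1 hkeq
        rw [hidx] at h3
        have h3t : ((k == 0 || k == word.length - 1) ||
            !(PySem.Chars.isalpha (word.getD (k - 1) ' ') &&
              PySem.Chars.isalpha (word.getD (k + 1) ' '))) = true := h3
        simp only [Bool.or_eq_true, beq_iff_eq, Bool.not_eq_true',
          Bool.and_eq_false_iff] at h3t
        obtain ⟨h0, hlen, hal, har, -⟩ := hgood
        rcases h3t with (h3t | h3t) | (h3t | h3t)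
        · exact h0 h3t
        · exact hlen (by omega)
        · simp_all
        · simp_all
    · obtain ⟨c, hcm, hcp⟩ := List.any_eq_true.mp h4
      obtain ⟨i, hi, hie⟩ := List.mem_iff_getElem.mp hcm
      have hiw : i < word.length := by simp at hi; omega
      have := ((badAt_eq_false_iff word i hiw).mp (hb i hiw)).2.2
      rw [List.getElem_dropLast] at hie
      subst hie
      simp at hcp
      have hlast := this (by tauto)
      simp at hi; omega
    · rfl

theorem perWord (word : List Char) : solInner word word 0 0 = okAlt word := by
  have hA := solInner_eq_all word word 0 rfl
  simp only [List.take_zero, List.count_nil, Nat.sub_zero] at hA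
  rw [okAlt_eq_all, List.range_eq_range']
  exact hA

-- ===== VERDICT (by name: the statement is the Claim_ definition above) =====
theorem solution_spec : Claim_equal_solution := by
  intro w _
  unfold Spec_solution solution solution_alt
  rw [PySem.List.foldl_if_add_one]
  have hfun : (fun word => solInner (String.toList word) (String.toList word) 0 0)
       = (fun word => okAlt (String.toList word)) := by
    funext word; exact perWord _
  rw [hfun]; ring
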